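-- pv_equiv track=rewrite | github.com/CodyBuilder-dev/Algorithm-Coding-Test | problems/algospot/FENCE-wrong.py | calc
-- ===== SOURCE A (Python) =====
-- def calc(heights):
--     dp = [[0]*len(heights) for i in range(len(heights))]
--     for i in range(len(heights)):
--         for j in range(i,len(heights)):
--             height = min(heights[i:j+1])
--             width = j - i + 1
--             dp[i][j] = width*height
--     return dp
-- ===== SOURCE B (Python) =====
-- def calc(heights):
--     n = len(heights)
--     dp = []
--     for i in range(n):
--         row = [0] * i
--         m = None
--         for j in range(i, n):
--             v = heights[j]
--             if m is None or v < m: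
--                 m = v
--             row.append((j - i + 1) * m)
--         dp.append(row)
--     return dp
-- ===== Notes on version B (the rewrite author's own statement) =====
-- stated objective: faster
-- what changed: Replaces the O(n) min(heights[i:j+1]) slice-scan inside the double loop by a running minimum carried along j for each start index i, and builds each row directly instead of mutating a preallocated matrix.
import Mathlib
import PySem

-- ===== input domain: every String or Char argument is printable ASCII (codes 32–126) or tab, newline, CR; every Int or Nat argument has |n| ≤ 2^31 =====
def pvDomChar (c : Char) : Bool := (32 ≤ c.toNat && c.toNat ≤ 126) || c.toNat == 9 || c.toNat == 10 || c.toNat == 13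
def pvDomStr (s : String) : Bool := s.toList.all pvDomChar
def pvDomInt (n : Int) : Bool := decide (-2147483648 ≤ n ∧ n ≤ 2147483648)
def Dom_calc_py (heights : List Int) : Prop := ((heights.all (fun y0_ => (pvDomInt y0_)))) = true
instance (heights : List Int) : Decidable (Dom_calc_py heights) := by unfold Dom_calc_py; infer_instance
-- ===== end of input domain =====

-- B replaces the min(heights[i:j+1]) slice-scan inside A's double loop by a running minimum per start index.

-- ===== PORT A =====
-- range(i, n) is List.range' i (n - i); dp[i][j] = v is set at Nat indices (in range, so List.set is exact).
-- min(heights[i:j+1]) : the slice is nonempty (i ≤ j < n), so Python's min never raises; `.getD 0` is unreachable.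
def calc_py (heights : List Int) : List (List Int) :=
  let n := heights.length
  let dp := (List.range n).map (fun _ => List.replicate n (0 : Int))
  (List.range n).foldl (fun dp i =>
    (List.range' i (n - i)).foldl (fun dp (j : Nat) =>
      let height := (PySem.List.min? (PySem.List.slice heights (some (i : Int)) (some ((j : Int) + 1))) (fun x => x)).getD 0
      let width : Int := (j : Int) - (i : Int) + 1
      dp.set i ((dp.getD i []).set j (width * height))) dp) dp

-- ===== PORT B =====
-- heights[j] with i ≤ j < n is in range, so `.getD 0` is exact.
def calc_py_alt (heights : List Int) : List (List Int) :=
  let n := heights.length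
  (List.range n).foldl (fun dp i =>
    let st := (List.range' i (n - i)).foldl
      (fun (st : List Int × Option Int) (j : Nat) =>
        let v := heights.getD j 0
        let m := match st.2 with
          | none => v
          | some m => if v < m then v else m
        (st.1 ++ [((j : Int) - (i : Int) + 1) * m], some m))
      (List.replicate i (0 : Int), none)
    dp ++ [st.1]) []

-- ===== PRECONDITION & SPEC =====
def Spec_calc_py (heights : List Int) (out : List (List Int)) : Prop := out = calc_py_alt heights
instance (heights : List Int) (out : List (List Int)) : Decidable (Spec_calc_py heights out) := by unfold Spec_calc_py; infer_instance

-- ===== CLAIM (what is proved, stated in full; the proofs are below) =====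
def Claim_equal_calc_py : Prop := ∀ (heights : List Int), Dom_calc_py heights → Spec_calc_py heights (calc_py heights)

-- ===== LEMMAS AND PROOFS =====

-- minimum of a nonempty Int list (0 on []), the value Python's min returns there
def pvMinD (l : List Int) : Int := match l with
  | [] => 0
  | x :: t => t.foldl min x

-- the common cell value: (j-i+1) * min(heights[i..j])
def pvF (heights : List Int) (i j : Nat) : Int :=
  ((j : Int) - (i : Int) + 1) * pvMinD ((heights.drop i).take (j + 1 - i))

-- the common row i
def pvRow (heights : List Int) (i : Nat) : List Int :=
  List.replicate i (0 : Int) ++ (List.range' i (heights.length - i)).map (pvF heights i)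

theorem pvMin?_getD (l : List Int) :
    (PySem.List.min? l (fun x => x)).getD 0 = pvMinD l := by
  cases l with
  | nil => simp [PySem.List.min?, pvMinD]
  | cons x t => rw [PySem.List.min?_id_cons]; rfl

theorem pvIte_min (v m : Int) : (if v < m then v else m) = min m v := by
  rw [min_def]; split_ifs <;> omega

theorem pvMinD_concat (s : List Int) (hs : s ≠ []) (v : Int) :
    pvMinD (s ++ [v]) = min (pvMinD s) v := by
  cases s with
  | nil => exact absurd rfl hs
  | cons x t => simp [pvMinD, List.foldl_append]

-- B's inner loop: running min = min of the prefix, appended values are pvF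
theorem pv_inner_B (heights : List Int) (i : Nat) (row0 : List Int) :
    ∀ k, i + k ≤ heights.length →
    (List.range' i k).foldl
      (fun (st : List Int × Option Int) (j : Nat) =>
        let v := heights.getD j 0
        let m := match st.2 with
          | none => v
          | some m => if v < m then v else m
        (st.1 ++ [((j : Int) - (i : Int) + 1) * m], some m))
      (row0, none)
    = (row0 ++ (List.range' i k).map (pvF heights i),
       if k = 0 then none else some (pvMinD ((heights.drop i).take k))) := by
  intro k hk
  induction k with
  | zero => simp
  | succ k ih =>
    have hlt : i + k < heights.length := by omega
    have hklt : k < (heights.drop i).length := by simp; omega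
    have hget : heights.getD (i + k) 0 = (heights.drop i)[k] := by
      rw [List.getElem_drop]
      simp [List.getD, List.getElem?_eq_getElem hlt]
    have htake : (heights.drop i).take (k + 1) = (heights.drop i).take k ++ [(heights.drop i)[k]] := by
      rw [List.take_add_one, List.getElem?_eq_getElem hklt]; rfl
    have harith : ((↑(i + k) : Int) - (i : Int) + 1) = ((k : Int) + 1) := by push_cast; ring
    conv_lhs => rw [List.range'_1_concat, List.foldl_append, ih (by omega)]
    cases k with
    | zero =>
      have h1 : i + 0 + 1 - i = 0 + 1 := by omega
      refine Prod.ext ?_ ?_ <;>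
        simp [pvF, h1, htake, pvMinD, List.range'_one,
          List.getElem?_eq_getElem (show i < heights.length by omega)]
    | succ k' =>
      have hne : (heights.drop i).take (k' + 1) ≠ [] := by
        have hlen : ((heights.drop i).take (k' + 1)).length = k' + 1 := by
          simp [List.length_take]; omega
        intro hcon
        rw [hcon] at hlen
        simp at hlen
      have hif : (if k' + 1 = 0 then (none : Option Int)
            else some (pvMinD ((heights.drop i).take (k' + 1))))
          = some (pvMinD ((heights.drop i).take (k' + 1))) := by simp
      rw [hif]
      simp only [List.foldl_cons, List.foldl_nil]
      have hm : (if heights.getD (i + (k' + 1)) 0 < pvMinD ((heights.drop i).take (k' + 1))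
            then heights.getD (i + (k' + 1)) 0 else pvMinD ((heights.drop i).take (k' + 1)))
          = pvMinD ((heights.drop i).take (k' + 1 + 1)) := by
        rw [hget, pvIte_min, htake, pvMinD_concat _ hne]
      rw [hm, harith]
      conv_rhs => rw [List.range'_1_concat, List.map_append]
      have h2 : i + (k' + 1) + 1 - i = k' + 1 + 1 := by omega
      simp [pvF, h2, harith, List.append_assoc]

-- A's inner loop only touches row i
theorem pv_inner_A_row (f : Nat → Int) (i : Nat) :
    ∀ (js : List Nat) (dp : List (List Int)), i < dp.length →
    js.foldl (fun dp j => dp.set i ((dp.getD i []).set j (f j))) dp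
    = dp.set i (js.foldl (fun r j => r.set j (f j)) (dp.getD i [])) := by
  intro js
  induction js with
  | nil =>
    intro dp hi
    simp only [List.foldl_nil]
    apply List.ext_getElem (by simp)
    intro m h1 h2
    rw [List.getElem_set]
    split
    · next h => subst h; simp [List.getD, List.getElem?_eq_getElem hi]
    · rfl
  | cons j js ih =>
    intro dp hi
    simp only [List.foldl_cons]
    rw [ih _ (by simpa using hi), List.set_set]
    congr 2
    simp [List.getD, List.getElem?_eq_getElem, hi, List.getElem_set_self]

-- setting positions i..i+k-1 of a zero row of length n
theorem pv_row_fill (f : Nat → Int) (n i : Nat) :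
    ∀ k, i + k ≤ n →
    (List.range' i k).foldl (fun r j => r.set j (f j)) (List.replicate n (0 : Int))
    = List.replicate i (0 : Int) ++ (List.range' i k).map f ++ List.replicate (n - (i + k)) (0 : Int) := by
  intro k hk
  induction k with
  | zero =>
    simp only [List.range'_zero, List.foldl_nil, List.map_nil, List.append_nil]
    rw [← List.replicate_add]
    congr 1
    omega
  | succ k ih =>
    conv_lhs => rw [List.range'_1_concat, List.foldl_append, ih (by omega)]
    simp only [List.foldl_cons, List.foldl_nil]
    have hlen : (List.replicate i (0 : Int) ++ (List.range' i k).map f).length = i + k := by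
      simp
    rw [List.set_append_right _ _ (le_of_eq hlen), hlen, Nat.sub_self,
        show n - (i + k) = (n - (i + (k + 1))) + 1 from by omega,
        List.replicate_succ, List.set_cons_zero]
    conv_rhs => rw [List.range'_1_concat, List.map_append]
    simp [List.append_assoc]

-- generic snoc-fold builds a map
theorem pv_foldl_snoc {α β : Type} (F : α → β) :
    ∀ (l : List α) (acc : List β),
    l.foldl (fun dp i => dp ++ [F i]) acc = acc ++ l.map F := by
  intro l
  induction l with
  | nil => intro acc; simp
  | cons x t ih => intro acc; simp [ih]

-- A's cell value equals pvF's min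
theorem pv_val_A (heights : List Int) (i j : Nat) :
    (PySem.List.min? (PySem.List.slice heights (some (i : Int)) (some ((j : Int) + 1))) (fun x => x)).getD 0
    = pvMinD ((heights.drop i).take (j + 1 - i)) := by
  have hj : ((j : Int) + 1) = (((j + 1 : Nat)) : Int) := by push_cast; ring
  rw [hj, PySem.List.slice_natCast, pvMin?_getD]

-- A's program equals the row table
theorem pv_A_outer (heights : List Int) :
    calc_py heights = (List.range heights.length).map (pvRow heights) := by
  unfold calc_py
  simp only []
  have hstep : ∀ (dp : List (List Int)) (i : Nat), i < heights.length →
      dp.length = heights.length → dp.getD i [] = List.replicate heights.length 0 →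
      (List.range' i (heights.length - i)).foldl (fun dp (j : Nat) =>
        let height := (PySem.List.min? (PySem.List.slice heights (some (i : Int)) (some ((j : Int) + 1))) (fun x => x)).getD 0
        let width : Int := (j : Int) - (i : Int) + 1
        dp.set i ((dp.getD i []).set j (width * height))) dp
      = dp.set i (pvRow heights i) := by
    intro dp i hi hlen hrow
    have hfun : (fun (dp : List (List Int)) (j : Nat) =>
        let height := (PySem.List.min? (PySem.List.slice heights (some (i : Int)) (some ((j : Int) + 1))) (fun x => x)).getD 0
        let width : Int := (j : Int) - (i : Int) + 1
        dp.set i ((dp.getD i []).set j (width * height)))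
        = (fun (dp : List (List Int)) (j : Nat) => dp.set i ((dp.getD i []).set j (pvF heights i j))) := by
      funext dp j
      simp only [pvF, pv_val_A]
    rw [hfun, pv_inner_A_row (pvF heights i) i _ dp (by omega), hrow,
        pv_row_fill (pvF heights i) heights.length i (heights.length - i) (by omega)]
    congr 1
    have : heights.length - (i + (heights.length - i)) = 0 := by omega
    rw [this]
    simp [pvRow]
  have houter : ∀ k, k ≤ heights.length →
      (List.range' 0 k).foldl (fun dp i =>
        (List.range' i (heights.length - i)).foldl (fun dp (j : Nat) =>
          let height := (PySem.List.min? (PySem.List.slice heights (some (i : Int)) (some ((j : Int) + 1))) (fun x => x)).getD 0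
          let width : Int := (j : Int) - (i : Int) + 1
          dp.set i ((dp.getD i []).set j (width * height))) dp)
        ((List.range heights.length).map (fun _ => List.replicate heights.length (0 : Int)))
      = (List.range heights.length).map (fun i =>
          if i < k then pvRow heights i else List.replicate heights.length (0 : Int)) := by
    intro k hkle
    induction k with
    | zero => simp
    | succ k ih =>
      conv_lhs => rw [List.range'_1_concat, List.foldl_append, ih (by omega)]
      simp only [Nat.zero_add, List.foldl_cons, List.foldl_nil]
      rw [hstep _ k (by omega) (by simp) ?hrow]
      case hrow =>
        have hk : k < heights.length := by omega
        simp [List.getD, List.getElem?_eq_getElem, hk, List.getElem?_map, List.getElem?_range, if_neg (lt_irrefl k)]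
      apply List.ext_getElem (by simp)
      intro m h1 h2
      simp only [List.length_set] at h1
      rw [List.getElem_set]
      have hm : m < heights.length := by simpa using h2
      split
      · next h =>
        subst h
        simp [List.getElem_map, List.getElem_range]
      · next h =>
        simp only [List.getElem_map, List.getElem_range]
        have hmk : (m < k) ↔ (m < k + 1) := by omega
        simp only [hmk]
  have hfin := houter heights.length (le_refl _)
  rw [← List.range_eq_range'] at hfin
  rw [hfin]
  apply List.map_congr_left
  intro i hi
  rw [if_pos (List.mem_range.mp hi)]

-- B's program equals the row table
theorem pv_B_outer (heights : List Int) :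
    calc_py_alt heights = (List.range heights.length).map (pvRow heights) := by
  have h0 : calc_py_alt heights = (List.range heights.length).foldl (fun dp i =>
      dp ++ [((List.range' i (heights.length - i)).foldl
        (fun (st : List Int × Option Int) (j : Nat) =>
          let v := heights.getD j 0
          let m := match st.2 with
            | none => v
            | some m => if v < m then v else m
          (st.1 ++ [((j : Int) - (i : Int) + 1) * m], some m))
        (List.replicate i (0 : Int), none)).1]) [] := rfl
  rw [h0, pv_foldl_snoc]
  simp only [List.nil_append]
  apply List.map_congr_left
  intro i hi
  have hi' : i < heights.length := List.mem_range.mp hi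
  rw [pv_inner_B heights i _ (heights.length - i) (by omega)]
  rfl

-- ===== VERDICT (by name: the statement is the Claim_ definition above) =====
theorem calc_py_spec : Claim_equal_calc_py := by
  intro heights _
  unfold Spec_calc_py
  rw [pv_A_outer, pv_B_outer]
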